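-- pv_equiv track=rewrite | github.com/Barkyeongchan/miniproject | src/prototypes/prototypes.py | select_closest_objects_perspective
-- ===== SOURCE A (Python) =====
-- def select_closest_objects_perspective(side_objects, frame_width):
--     """
--     탐지된 차량들 중 좌/우측에서 가장 가까이 있는 차량(바운딩박스 Y좌표가 가장 큰)을 선택합니다.
--     원근법에 따라, 화면 아래쪽에 있을수록 더 가까운 차량으로 판단합니다.
--     side_objects: 탐지된 모든 차량의 바운딩박스 리스트
--     frame_width: 영상의 너비
--     반환값: ('left' 또는 'right', 바운딩박스) 튜플의 리스트
--     """
--     left_obj, right_obj = None, None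
--     left_max_y, right_max_y = -1, -1
--     center_x = frame_width // 2
--     for x1, y1, x2, y2 in side_objects:
--         obj_cx = (x1 + x2) // 2
--         obj_bottom = y2
--         if obj_cx < center_x:  # 화면 왼쪽 영역의 차량
--             if obj_bottom > left_max_y:
--                 left_max_y = obj_bottom
--                 left_obj = (x1, y1, x2, y2)
--         else:  # 화면 오른쪽 영역의 차량
--             if obj_bottom > right_max_y:
--                 right_max_y = obj_bottom
--                 right_obj = (x1, y1, x2, y2)
--     selected = []
--     if left_obj: selected.append(('left', left_obj))
--     if right_obj: selected.append(('right', right_obj))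
--     return selected
-- ===== SOURCE B (Python) =====
-- def select_closest_objects_perspective(side_objects, frame_width):
--     center_x = frame_width // 2
--     left = [o for o in side_objects if (o[0] + o[2]) // 2 < center_x]
--     right = [o for o in side_objects if (o[0] + o[2]) // 2 >= center_x]
--     return [(label, max(group, key=lambda o: o[3]))
--             for label, group in (('left', left), ('right', right)) if group]
-- ===== Notes on version B (the rewrite author's own statement) =====
-- stated objective: alternative
-- what changed: Replaces A's single pass over four interleaved accumulators with a partition into left/right lists followed by max(key=y2) per non-empty side; same cost, different decomposition.
-- intended difference: On inputs where some side is non-empty but every box on that side has bottom y2 < 0, A omits that side entirely (its -1 running-max sentinel is never beaten) while B returns that side's bottom-most box; silently dropping a detected vehicle because its bottom coordinate is negative is an artifact of the sentinel, not the intended selection. — e.g. on select_closest_objects_perspective([(0, 0, 0, -1)], 2): A returns [], B returns [("left", (0, 0, 0, -1))]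
import Mathlib
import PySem

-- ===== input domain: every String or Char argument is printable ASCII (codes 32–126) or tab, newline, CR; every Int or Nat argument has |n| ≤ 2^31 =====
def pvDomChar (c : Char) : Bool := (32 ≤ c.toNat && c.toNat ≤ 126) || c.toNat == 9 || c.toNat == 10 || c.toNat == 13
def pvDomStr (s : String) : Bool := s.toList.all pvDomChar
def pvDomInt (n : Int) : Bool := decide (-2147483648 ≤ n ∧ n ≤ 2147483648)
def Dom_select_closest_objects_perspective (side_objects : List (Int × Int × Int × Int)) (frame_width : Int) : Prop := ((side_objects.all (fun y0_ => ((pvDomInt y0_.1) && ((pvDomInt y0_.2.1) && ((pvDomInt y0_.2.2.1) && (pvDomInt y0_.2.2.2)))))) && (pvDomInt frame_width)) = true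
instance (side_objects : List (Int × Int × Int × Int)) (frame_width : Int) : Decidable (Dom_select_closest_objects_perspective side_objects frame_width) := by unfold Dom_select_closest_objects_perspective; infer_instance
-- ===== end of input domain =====

-- B partitions into left/right lists and picks each non-empty side's first bottom-maximal box,
-- instead of A's one pass over four accumulators; same cost, alternative decomposition.
-- Intended difference (see D_): A drops a side whose boxes all have negative bottoms.

-- ===== PORT A =====
-- loop body of A's for-loop: state = (left_obj, right_obj, left_max_y, right_max_y)
def pvStepA (center_x : Int)
    (s : Option (Int × Int × Int × Int) × Option (Int × Int × Int × Int) × Int × Int)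
    (o : Int × Int × Int × Int) :
    Option (Int × Int × Int × Int) × Option (Int × Int × Int × Int) × Int × Int :=
  let obj_cx := PySem.Int.floordiv (o.1 + o.2.2.1) 2
  if obj_cx < center_x then
    if o.2.2.2 > s.2.2.1 then (some o, s.2.1, o.2.2.2, s.2.2.2) else s
  else
    if o.2.2.2 > s.2.2.2 then (s.1, some o, s.2.2.1, o.2.2.2) else s

def select_closest_objects_perspective (side_objects : List (Int × Int × Int × Int)) (frame_width : Int) : List (String × (Int × Int × Int × Int)) :=
  let center_x := PySem.Int.floordiv frame_width 2
  let st := side_objects.foldl (pvStepA center_x) (none, none, -1, -1)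
  -- selected = []; if left_obj: append ('left', …); if right_obj: append ('right', …)
  (match st.1 with | some b => [("left", b)] | none => [])
    ++ (match st.2.1 with | some b => [("right", b)] | none => [])

-- ===== PORT B =====
-- Python's max(group, key=lambda o: o[3]): first element with maximal o[3] (strict-> replacement)
def pvMstep (b o : Int × Int × Int × Int) : Int × Int × Int × Int :=
  if o.2.2.2 > b.2.2.2 then o else b

-- one entry of B's comprehension: ('label', max(group, key=…)) when group is non-empty
def pvPickB (label : String) (group : List (Int × Int × Int × Int)) : List (String × (Int × Int × Int × Int)) :=
  match group with
  | [] => []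
  | h :: t => [(label, t.foldl pvMstep h)]

def select_closest_objects_perspective_alt (side_objects : List (Int × Int × Int × Int)) (frame_width : Int) : List (String × (Int × Int × Int × Int)) :=
  let center_x := PySem.Int.floordiv frame_width 2
  let left := side_objects.filter (fun o => decide (PySem.Int.floordiv (o.1 + o.2.2.1) 2 < center_x))
  let right := side_objects.filter (fun o => decide (center_x ≤ PySem.Int.floordiv (o.1 + o.2.2.1) 2))
  pvPickB "left" left ++ pvPickB "right" right

-- ===== PRECONDITION & SPEC =====
-- On inputs where some side is non-empty but every box on that side has bottom y2 < 0, A omits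
-- that side (its -1 running-max sentinel is never beaten) while B returns that side's bottom-most
-- box; dropping a detected vehicle because its bottom is negative is a sentinel artifact, not intended.
def D_select_closest_objects_perspective (side_objects : List (Int × Int × Int × Int)) (frame_width : Int) : Prop :=
  ∃ o ∈ side_objects, ∀ p ∈ side_objects,
    (((p.1 + p.2.2.1) / 2 < frame_width / 2) ↔ ((o.1 + o.2.2.1) / 2 < frame_width / 2)) → p.2.2.2 < 0
instance (side_objects : List (Int × Int × Int × Int)) (frame_width : Int) : Decidable (D_select_closest_objects_perspective side_objects frame_width) := by unfold D_select_closest_objects_perspective; infer_instance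

def Spec_select_closest_objects_perspective (side_objects : List (Int × Int × Int × Int)) (frame_width : Int) (out : List (String × (Int × Int × Int × Int))) : Prop := ¬ D_select_closest_objects_perspective side_objects frame_width → out = select_closest_objects_perspective_alt side_objects frame_width
instance (side_objects : List (Int × Int × Int × Int)) (frame_width : Int) (out : List (String × (Int × Int × Int × Int))) : Decidable (Spec_select_closest_objects_perspective side_objects frame_width out) := by unfold Spec_select_closest_objects_perspective; infer_instance

def pvDiffWitness_select_closest_objects_perspective : (List (Int × Int × Int × Int)) × Int := ([(0, 0, 0, -1)], 2)
def pvDiffWitnessOut_select_closest_objects_perspective : (List (String × (Int × Int × Int × Int))) × (List (String × (Int × Int × Int × Int))) := ([], [("left", (0, 0, 0, -1))])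

-- ===== CLAIM (what is proved, stated in full; the proofs are below) =====
def Claim_unchanged_select_closest_objects_perspective : Prop := ∀ (side_objects : List (Int × Int × Int × Int)) (frame_width : Int), Dom_select_closest_objects_perspective side_objects frame_width → Spec_select_closest_objects_perspective side_objects frame_width (select_closest_objects_perspective side_objects frame_width)
def Claim_changed_select_closest_objects_perspective : Prop := Dom_select_closest_objects_perspective (pvDiffWitness_select_closest_objects_perspective.1) (pvDiffWitness_select_closest_objects_perspective.2) ∧ D_select_closest_objects_perspective (pvDiffWitness_select_closest_objects_perspective.1) (pvDiffWitness_select_closest_objects_perspective.2) ∧ select_closest_objects_perspective (pvDiffWitness_select_closest_objects_perspective.1) (pvDiffWitness_select_closest_objects_perspective.2) = pvDiffWitnessOut_select_closest_objects_perspective.1 ∧ select_closest_objects_perspective_alt (pvDiffWitness_select_closest_objects_perspective.1) (pvDiffWitness_select_closest_objects_perspective.2) = pvDiffWitnessOut_select_closest_objects_perspective.2 ∧ pvDiffWitnessOut_select_closest_objects_perspective.1 ≠ pvDiffWitnessOut_select_closest_objects_perspective.2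
def Claim_exact_select_closest_objects_perspective : Prop := ∀ (side_objects : List (Int × Int × Int × Int)) (frame_width : Int), Dom_select_closest_objects_perspective side_objects frame_width → D_select_closest_objects_perspective side_objects frame_width → select_closest_objects_perspective side_objects frame_width ≠ select_closest_objects_perspective_alt side_objects frame_width

-- ===== LEMMAS AND PROOFS =====

-- one-side accumulator of A: state = (best so far, running max bottom)
def pvSide (s : Option (Int × Int × Int × Int) × Int) (o : Int × Int × Int × Int) :
    Option (Int × Int × Int × Int) × Int :=
  if o.2.2.2 > s.2 then (some o, o.2.2.2) else s

-- what A's one-side fold yields: the first bottom-maximal box, if its bottom is ≥ 0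
def pvOptPick (group : List (Int × Int × Int × Int)) : Option (Int × Int × Int × Int) :=
  match group with
  | [] => none
  | h :: t =>
      let best := t.foldl pvMstep h
      if 0 ≤ best.2.2.2 then some best else none

-- branch characterisations of A's loop body
theorem pvStepA_left (c : Int) (lo ro : Option (Int × Int × Int × Int)) (lm rm : Int)
    (o : Int × Int × Int × Int) (hc : PySem.Int.floordiv (o.1 + o.2.2.1) 2 < c) :
    pvStepA c (lo, ro, lm, rm) o = ((pvSide (lo, lm) o).1, ro, (pvSide (lo, lm) o).2, rm) := by
  unfold pvStepA pvSide
  rw [if_pos hc]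
  split_ifs <;> rfl

theorem pvStepA_right (c : Int) (lo ro : Option (Int × Int × Int × Int)) (lm rm : Int)
    (o : Int × Int × Int × Int) (hc : ¬ PySem.Int.floordiv (o.1 + o.2.2.1) 2 < c) :
    pvStepA c (lo, ro, lm, rm) o = (lo, (pvSide (ro, rm) o).1, lm, (pvSide (ro, rm) o).2) := by
  unfold pvStepA pvSide
  rw [if_neg hc]
  split_ifs <;> rfl

-- A's fold decomposes into two independent one-side folds over the two filtered lists
theorem pvDecompose (xs : List (Int × Int × Int × Int)) (c : Int)
    (lo ro : Option (Int × Int × Int × Int)) (lm rm : Int) :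
    xs.foldl (pvStepA c) (lo, ro, lm, rm) =
      (((xs.filter (fun o => decide (PySem.Int.floordiv (o.1 + o.2.2.1) 2 < c))).foldl pvSide (lo, lm)).1,
       ((xs.filter (fun o => !decide (PySem.Int.floordiv (o.1 + o.2.2.1) 2 < c))).foldl pvSide (ro, rm)).1,
       ((xs.filter (fun o => decide (PySem.Int.floordiv (o.1 + o.2.2.1) 2 < c))).foldl pvSide (lo, lm)).2,
       ((xs.filter (fun o => !decide (PySem.Int.floordiv (o.1 + o.2.2.1) 2 < c))).foldl pvSide (ro, rm)).2) := by
  induction xs generalizing lo ro lm rm with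
  | nil => rfl
  | cons o t ih =>
      by_cases hc : PySem.Int.floordiv (o.1 + o.2.2.1) 2 < c
      · have hb : decide (PySem.Int.floordiv (o.1 + o.2.2.1) 2 < c) = true := decide_eq_true hc
        have h1 : (o :: t).filter (fun o => decide (PySem.Int.floordiv (o.1 + o.2.2.1) 2 < c)) =
            o :: t.filter (fun o => decide (PySem.Int.floordiv (o.1 + o.2.2.1) 2 < c)) := by
          simp only [List.filter_cons, hb, if_true]
        have h2 : (o :: t).filter (fun o => !decide (PySem.Int.floordiv (o.1 + o.2.2.1) 2 < c)) =
            t.filter (fun o => !decide (PySem.Int.floordiv (o.1 + o.2.2.1) 2 < c)) := by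
          simp only [List.filter_cons, hb, Bool.not_true, Bool.false_eq_true, if_false]
        rw [List.foldl_cons, pvStepA_left c lo ro lm rm o hc, ih, h1, h2, List.foldl_cons]
      · have hb : decide (PySem.Int.floordiv (o.1 + o.2.2.1) 2 < c) = false := decide_eq_false hc
        have h1 : (o :: t).filter (fun o => decide (PySem.Int.floordiv (o.1 + o.2.2.1) 2 < c)) =
            t.filter (fun o => decide (PySem.Int.floordiv (o.1 + o.2.2.1) 2 < c)) := by
          simp only [List.filter_cons, hb, Bool.false_eq_true, if_false]
        have h2 : (o :: t).filter (fun o => !decide (PySem.Int.floordiv (o.1 + o.2.2.1) 2 < c)) =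
            o :: t.filter (fun o => !decide (PySem.Int.floordiv (o.1 + o.2.2.1) 2 < c)) := by
          simp only [List.filter_cons, hb, Bool.not_false, if_true]
        rw [List.foldl_cons, pvStepA_right c lo ro lm rm o hc, ih, h1, h2, List.foldl_cons]

-- once a side has a best b with running max = b's bottom, the side fold is the first-maximal fold
theorem pvSide_seeded (t : List (Int × Int × Int × Int)) (b : Int × Int × Int × Int) :
    t.foldl pvSide (some b, b.2.2.2) =
      (some (t.foldl pvMstep b), (t.foldl pvMstep b).2.2.2) := by
  induction t generalizing b with
  | nil => rfl
  | cons o u ih =>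
      by_cases hy : o.2.2.2 > b.2.2.2 <;>
        simp [pvSide, pvMstep, hy, List.foldl_cons, ih]

-- the first-maximal fold never decreases the bottom coordinate
theorem pvMstep_mono (t : List (Int × Int × Int × Int)) (b : Int × Int × Int × Int) :
    b.2.2.2 ≤ (t.foldl pvMstep b).2.2.2 := by
  induction t generalizing b with
  | nil => simp
  | cons o u ih =>
      simp only [List.foldl_cons]
      refine le_trans ?_ (ih (pvMstep b o))
      simp only [pvMstep]
      split_ifs with h
      · omega
      · omega

-- seed comparison: a fold seeded with the smaller element either agrees with the larger seed's fold,
-- or the larger seed is never beaten and the smaller fold stays below it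
theorem pvMstep_seed (u : List (Int × Int × Int × Int)) (a c : Int × Int × Int × Int)
    (h : c.2.2.2 ≤ a.2.2.2) :
    u.foldl pvMstep a = u.foldl pvMstep c ∨
      (u.foldl pvMstep a = a ∧ (u.foldl pvMstep c).2.2.2 ≤ a.2.2.2) := by
  induction u generalizing a c with
  | nil => exact Or.inr ⟨rfl, h⟩
  | cons o v ih =>
      by_cases hy : o.2.2.2 > a.2.2.2
      · left
        have hy' : o.2.2.2 > c.2.2.2 := by omega
        simp [List.foldl_cons, pvMstep, hy, hy']
      · have h2 : (pvMstep c o).2.2.2 ≤ a.2.2.2 := by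
          simp only [pvMstep]; split_ifs with hx <;> omega
        have := ih a (pvMstep c o) h2
        simpa [List.foldl_cons, pvMstep, hy] using this

-- characterisation of A's one-side fold from the initial (None, -1) state
theorem pvSide_main (ys : List (Int × Int × Int × Int)) :
    (ys.foldl pvSide (none, -1)).1 = pvOptPick ys := by
  induction ys with
  | nil => rfl
  | cons h t ih =>
      by_cases hy : h.2.2.2 > (-1 : Int)
      · have h0 : (0 : Int) ≤ h.2.2.2 := by omega
        have hmax : (0 : Int) ≤ (t.foldl pvMstep h).2.2.2 :=
          le_trans h0 (pvMstep_mono t h)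
        simp [List.foldl_cons, pvSide, hy, pvSide_seeded, pvOptPick, hmax]
      · have hlt : h.2.2.2 < 0 := by omega
        have step : (h :: t).foldl pvSide (none, -1) = t.foldl pvSide (none, -1) := by
          simp [List.foldl_cons, pvSide, hy]
        rw [step, ih]
        cases t with
        | nil =>
            simp only [pvOptPick, List.foldl_nil]
            have : ¬ (0 : Int) ≤ h.2.2.2 := by omega
            simp [this]
        | cons k u =>
            by_cases hk : k.2.2.2 > h.2.2.2
            · simp [pvOptPick, List.foldl_cons, pvMstep, hk]
            · have hkh : k.2.2.2 ≤ h.2.2.2 := by omega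
              rcases pvMstep_seed u h k hkh with heq | ⟨ha, hb⟩
              · simp [pvOptPick, List.foldl_cons, pvMstep, hk, heq]
              · have g1 : ¬ (0 : Int) ≤ (u.foldl pvMstep h).2.2.2 := by rw [ha]; omega
                have g2 : ¬ (0 : Int) ≤ (u.foldl pvMstep k).2.2.2 := by omega
                simp [pvOptPick, List.foldl_cons, pvMstep, hk, g1, g2]

-- the two "right side" filters coincide
theorem pvFilter_right (xs : List (Int × Int × Int × Int)) (c : Int) :
    xs.filter (fun o => decide (c ≤ PySem.Int.floordiv (o.1 + o.2.2.1) 2)) =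
      xs.filter (fun o => !decide (PySem.Int.floordiv (o.1 + o.2.2.1) 2 < c)) := by
  apply List.filter_congr
  intro o _
  rw [← decide_not, decide_eq_decide]
  exact Int.not_lt.symm

-- the fold result is an element of the list it folds over
theorem pvMstep_mem (t : List (Int × Int × Int × Int)) (h : Int × Int × Int × Int) :
    t.foldl pvMstep h ∈ h :: t := by
  induction t generalizing h with
  | nil => simp
  | cons k u ih =>
      have := ih (pvMstep h k)
      simp only [List.foldl_cons]
      rcases List.mem_cons.1 this with he | hu
      · rw [he]
        simp only [pvMstep]
        split_ifs
        · simp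
        · simp
      · simp [hu]

-- every element's bottom is ≤ the fold's bottom
theorem pvMstep_max : ∀ (t : List (Int × Int × Int × Int)) (x o : Int × Int × Int × Int),
    o ∈ x :: t → o.2.2.2 ≤ (t.foldl pvMstep x).2.2.2 := by
  intro t
  induction t with
  | nil =>
      intro x o ho
      have : o = x := by simpa using ho
      rw [this]; simp
  | cons k u ih =>
      intro x o ho
      simp only [List.foldl_cons]
      rcases List.mem_cons.1 ho with he | ho'
      · subst he
        refine le_trans ?_ (pvMstep_mono u (pvMstep o k))
        simp only [pvMstep]; split_ifs with hx <;> omega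
      · rcases List.mem_cons.1 ho' with he | hu
        · subst he
          refine le_trans ?_ (pvMstep_mono u (pvMstep x o))
          simp only [pvMstep]; split_ifs with hx <;> omega
        · exact ih (pvMstep x k) o (List.mem_cons_of_mem _ hu)

-- outside the sentinel corner, A's guarded pick agrees with B's pick
theorem pvPick_agree (label : String) (g : List (Int × Int × Int × Int))
    (h : g = [] ∨ ∃ o ∈ g, 0 ≤ o.2.2.2) :
    (match pvOptPick g with | some b => [(label, b)] | none => ([] : List (String × (Int × Int × Int × Int)))) = pvPickB label g := by
  cases g with
  | nil => rfl
  | cons x t =>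
      rcases h with h | ⟨o, ho, hy⟩
      · exact absurd h (by simp)
      · have : (0 : Int) ≤ (t.foldl pvMstep x).2.2.2 := le_trans hy (pvMstep_max t x o ho)
        simp [pvOptPick, pvPickB, this]

-- inside the sentinel corner, A's guarded pick is empty
theorem pvPick_none (g : List (Int × Int × Int × Int))
    (hne : g ≠ []) (hall : ∀ o ∈ g, o.2.2.2 < 0) : pvOptPick g = none := by
  cases g with
  | nil => exact absurd rfl hne
  | cons x t =>
      have hb : (t.foldl pvMstep x).2.2.2 < 0 := hall _ (pvMstep_mem t x)
      have : ¬ (0 : Int) ≤ (t.foldl pvMstep x).2.2.2 := by omega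
      simp [pvOptPick, this]


-- A (left side dropped) differs from B (left side kept): the heads cannot match
theorem pvNeq_left (L R : List (Int × Int × Int × Int)) (hne : L ≠ [])
    (hall : ∀ o ∈ L, o.2.2.2 < 0) :
    ((match pvOptPick L with | some b => [("left", b)] | none => ([] : List (String × (Int × Int × Int × Int))))
      ++ (match pvOptPick R with | some b => [("right", b)] | none => [])) ≠
      pvPickB "left" L ++ pvPickB "right" R := by
  rw [pvPick_none L hne hall]
  obtain ⟨x, t, hL⟩ := List.exists_cons_of_ne_nil hne
  subst hL
  simp only [pvPickB]
  intro heq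
  cases hO : pvOptPick R with
  | none => rw [hO] at heq; simp at heq
  | some b => rw [hO] at heq; simp at heq

-- A (right side dropped) differs from B (right side kept): the lengths cannot match
theorem pvNeq_right (L R : List (Int × Int × Int × Int)) (hne : R ≠ [])
    (hall : ∀ o ∈ R, o.2.2.2 < 0) :
    ((match pvOptPick L with | some b => [("left", b)] | none => ([] : List (String × (Int × Int × Int × Int))))
      ++ (match pvOptPick R with | some b => [("right", b)] | none => [])) ≠
      pvPickB "left" L ++ pvPickB "right" R := by
  rw [pvPick_none R hne hall]
  obtain ⟨x, t, hR⟩ := List.exists_cons_of_ne_nil hne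
  subst hR
  simp only [pvPickB]
  intro heq
  have hlen := congrArg List.length heq
  cases hL : L with
  | nil =>
      rw [hL] at hlen
      simp [pvOptPick] at hlen
  | cons y u =>
      rw [hL] at hlen
      cases hO : pvOptPick (y :: u) <;> rw [hO] at hlen <;> simp at hlen


-- D_ (one box whose whole half-frame is negative) in terms of the two filtered side lists
theorem pvD_char (xs : List (Int × Int × Int × Int)) (fw : Int) :
    D_select_closest_objects_perspective xs fw ↔
      ((xs.filter (fun o => decide (PySem.Int.floordiv (o.1 + o.2.2.1) 2 < PySem.Int.floordiv fw 2)) ≠ [] ∧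
        ∀ o ∈ xs.filter (fun o => decide (PySem.Int.floordiv (o.1 + o.2.2.1) 2 < PySem.Int.floordiv fw 2)), o.2.2.2 < 0) ∨
       (xs.filter (fun o => decide (PySem.Int.floordiv fw 2 ≤ PySem.Int.floordiv (o.1 + o.2.2.1) 2)) ≠ [] ∧
        ∀ o ∈ xs.filter (fun o => decide (PySem.Int.floordiv fw 2 ≤ PySem.Int.floordiv (o.1 + o.2.2.1) 2)), o.2.2.2 < 0)) := by
  have hfd : ∀ a : Int, PySem.Int.floordiv a 2 = a / 2 :=
    fun a => PySem.Int.floordiv_eq_ediv_of_pos (by norm_num)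
  unfold D_select_closest_objects_perspective
  constructor
  · rintro ⟨o, ho, hall⟩
    by_cases hs : (o.1 + o.2.2.1) / 2 < fw / 2
    · left
      have hoL : o ∈ xs.filter (fun o => decide (PySem.Int.floordiv (o.1 + o.2.2.1) 2 < PySem.Int.floordiv fw 2)) :=
        List.mem_filter.2 ⟨ho, decide_eq_true (by rw [hfd, hfd]; exact hs)⟩
      refine ⟨List.ne_nil_of_mem hoL, ?_⟩
      intro p hp
      obtain ⟨hpx, hpd⟩ := List.mem_filter.1 hp
      have hpP := of_decide_eq_true hpd
      rw [hfd, hfd] at hpP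
      exact hall p hpx (iff_of_true hpP hs)
    · right
      have hoR : o ∈ xs.filter (fun o => decide (PySem.Int.floordiv fw 2 ≤ PySem.Int.floordiv (o.1 + o.2.2.1) 2)) :=
        List.mem_filter.2 ⟨ho, decide_eq_true (by rw [hfd, hfd]; omega)⟩
      refine ⟨List.ne_nil_of_mem hoR, ?_⟩
      intro p hp
      obtain ⟨hpx, hpd⟩ := List.mem_filter.1 hp
      have hple := of_decide_eq_true hpd
      rw [hfd, hfd] at hple
      exact hall p hpx (iff_of_false (by omega) hs)
  · rintro (⟨hne, hall⟩ | ⟨hne, hall⟩)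
    · obtain ⟨o, ho⟩ := List.exists_mem_of_ne_nil _ hne
      obtain ⟨hox, hod⟩ := List.mem_filter.1 ho
      have hso := of_decide_eq_true hod
      rw [hfd, hfd] at hso
      refine ⟨o, hox, fun p hp hside => ?_⟩
      have hpP : (p.1 + p.2.2.1) / 2 < fw / 2 := hside.2 hso
      exact hall p (List.mem_filter.2 ⟨hp, decide_eq_true (by rw [hfd, hfd]; exact hpP)⟩)
    · obtain ⟨o, ho⟩ := List.exists_mem_of_ne_nil _ hne
      obtain ⟨hox, hod⟩ := List.mem_filter.1 ho
      have hso := of_decide_eq_true hod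
      rw [hfd, hfd] at hso
      refine ⟨o, hox, fun p hp hside => ?_⟩
      have hpN : ¬ (p.1 + p.2.2.1) / 2 < fw / 2 := fun hlt => by
        have := hside.1 hlt
        omega
      exact hall p (List.mem_filter.2 ⟨hp, decide_eq_true (by rw [hfd, hfd]; omega)⟩)

-- ===== VERDICT (by name: the statement is the Claim_ definition above) =====
theorem select_closest_objects_perspective_spec : Claim_unchanged_select_closest_objects_perspective := by
  intro xs fw _
  unfold Spec_select_closest_objects_perspective
  intro hnD
  rw [pvD_char] at hnD
  push Not at hnD
  obtain ⟨hL, hR⟩ := hnD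
  simp only [select_closest_objects_perspective, select_closest_objects_perspective_alt]
  rw [pvDecompose, pvFilter_right]
  simp only [pvSide_main]
  rw [pvPick_agree, pvPick_agree]
  · rw [← pvFilter_right]
    by_cases he : xs.filter (fun o => decide (PySem.Int.floordiv fw 2 ≤ PySem.Int.floordiv (o.1 + o.2.2.1) 2)) = []
    · exact Or.inl he
    · obtain ⟨o, ho, hy⟩ := hR he
      exact Or.inr ⟨o, ho, by omega⟩
  · by_cases he : xs.filter (fun o => decide (PySem.Int.floordiv (o.1 + o.2.2.1) 2 < PySem.Int.floordiv fw 2)) = []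
    · exact Or.inl he
    · obtain ⟨o, ho, hy⟩ := hL he
      exact Or.inr ⟨o, ho, by omega⟩

theorem select_closest_objects_perspective_changed : Claim_changed_select_closest_objects_perspective := by
  unfold Claim_changed_select_closest_objects_perspective
  refine ⟨by decide, by decide, by decide, by decide, by decide⟩

theorem select_closest_objects_perspective_tight : Claim_exact_select_closest_objects_perspective := by
  intro xs fw _ hD
  rw [pvD_char] at hD
  simp only [select_closest_objects_perspective, select_closest_objects_perspective_alt]
  rw [pvDecompose, pvFilter_right]
  simp only [pvSide_main]
  rw [← pvFilter_right]
  rcases hD with ⟨hne, hall⟩ | ⟨hne, hall⟩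
  · exact pvNeq_left _ _ hne hall
  · exact pvNeq_right _ _ hne hall
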